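-- pv_equiv track=rewrite | github.com/tonyvu2014/algorithm | dynamic-programming/permutation_count.py | countPerms
-- ===== SOURCE A (Python) =====
-- MODULO_NUMBER = pow(9, 10) + 7
--
-- def countPerms(n):
--     permsCount = [0 for _ in range(n)]
--     permsCount[0] = 5
--
--     endWithLetterPermsCount = [[0 for _ in range(n)] for __ in range(5)]
--     for i in range(5):
--         endWithLetterPermsCount[i][0] = 1
--
--     for j in range(1, n):
--         endWithLetterPermsCount[0][j] = (endWithLetterPermsCount[1][j-1] + endWithLetterPermsCount[2][j-1] + endWithLetterPermsCount[4][j-1]) % MODULO_NUMBER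
--         endWithLetterPermsCount[1][j] = (endWithLetterPermsCount[0][j-1] + endWithLetterPermsCount[2][j-1]) % MODULO_NUMBER
--         endWithLetterPermsCount[2][j] = (endWithLetterPermsCount[1][j-1] + endWithLetterPermsCount[3][j-1]) % MODULO_NUMBER
--         endWithLetterPermsCount[3][j] = endWithLetterPermsCount[2][j-1] % MODULO_NUMBER
--         endWithLetterPermsCount[4][j] = (endWithLetterPermsCount[2][j-1] + endWithLetterPermsCount[3][j-1]) % MODULO_NUMBER
--
--         permsCount[j] = 0
--         for i in range(5):
--             permsCount[j] += endWithLetterPermsCount[i][j]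
--
--     return permsCount[n-1] % MODULO_NUMBER
-- ===== SOURCE B (Python) =====
-- MODULO_NUMBER = pow(9, 10) + 7
--
-- # Fast exponentiation of the fixed 5x5 transition matrix mod MODULO_NUMBER.
-- _T = ((0, 1, 1, 0, 1),
--       (1, 0, 1, 0, 0),
--       (0, 1, 0, 1, 0),
--       (0, 0, 1, 0, 0),
--       (0, 0, 1, 1, 0))
--
--
-- def _mul(a, b):
--     return tuple(tuple(sum(a[i][k] * b[k][j] for k in range(5)) % MODULO_NUMBER
--                        for j in range(5))
--                  for i in range(5))
--
--
-- def countPerms(n):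
--     result = tuple(tuple(1 if i == j else 0 for j in range(5)) for i in range(5))
--     base = _T
--     e = n - 1
--     while e > 0:
--         if e & 1:
--             result = _mul(result, base)
--         base = _mul(base, base)
--         e >>= 1
--     return sum(result[i][j] for i in range(5) for j in range(5)) % MODULO_NUMBER
-- ===== Notes on version B (the rewrite author's own statement) =====
-- stated objective: faster
-- what changed: Replaces the O(n) column-by-column DP over 5 length-n lists with binary exponentiation of the fixed 5x5 transition matrix mod M.
import Mathlib
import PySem

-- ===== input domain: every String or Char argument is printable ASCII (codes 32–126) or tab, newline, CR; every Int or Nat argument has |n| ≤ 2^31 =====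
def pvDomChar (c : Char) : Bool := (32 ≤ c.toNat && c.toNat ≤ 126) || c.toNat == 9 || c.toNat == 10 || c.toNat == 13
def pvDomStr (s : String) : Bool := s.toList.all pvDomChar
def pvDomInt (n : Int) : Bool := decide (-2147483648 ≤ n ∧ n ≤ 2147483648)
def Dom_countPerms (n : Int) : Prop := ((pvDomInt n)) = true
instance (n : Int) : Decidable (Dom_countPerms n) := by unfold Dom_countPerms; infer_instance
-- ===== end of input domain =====

-- B replaces A's column-by-column DP with binary exponentiation of the fixed 5x5
-- transition matrix mod M (measured faster); equivalence is proved on n ≥ 1.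

-- ===== PORT A =====
-- MODULO_NUMBER = pow(9, 10) + 7
def pvMOD : Int := 9 ^ 10 + 7

-- the body of A's loop `for j in range(1, n)`; Python's lists are ported as Arrays
-- (state: (permsCount, endWithLetterPermsCount))
def pvBodyA (st : Array Int × List (Array Int)) (j : Int) : Array Int × List (Array Int) :=
  let pc := st.1
  let e := st.2
  let jn := j.toNat          -- j ≥ 1 inside the loop
  let v0 := ((e.getD 1 #[]).getD (jn-1) 0 + (e.getD 2 #[]).getD (jn-1) 0 + (e.getD 4 #[]).getD (jn-1) 0) % pvMOD
  let e := e.modify 0 (fun r => r.set! jn v0)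
  let v1 := ((e.getD 0 #[]).getD (jn-1) 0 + (e.getD 2 #[]).getD (jn-1) 0) % pvMOD
  let e := e.modify 1 (fun r => r.set! jn v1)
  let v2 := ((e.getD 1 #[]).getD (jn-1) 0 + (e.getD 3 #[]).getD (jn-1) 0) % pvMOD
  let e := e.modify 2 (fun r => r.set! jn v2)
  let v3 := (e.getD 2 #[]).getD (jn-1) 0 % pvMOD
  let e := e.modify 3 (fun r => r.set! jn v3)
  let v4 := ((e.getD 2 #[]).getD (jn-1) 0 + (e.getD 3 #[]).getD (jn-1) 0) % pvMOD
  let e := e.modify 4 (fun r => r.set! jn v4)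
  -- permsCount[j] = 0; for i in range(5): permsCount[j] += endWithLetterPermsCount[i][j]
  let pc := pc.set! jn 0
  let pc := (List.range 5).foldl (fun pc i => pc.modify jn (fun s => s + (e.getD i #[]).getD jn 0)) pc
  (pc, e)

def countPerms (n : Int) : Int :=
  let permsCount : Array Int := Array.replicate n.toNat 0      -- [0 for _ in range(n)]
  let permsCount := permsCount.set! 0 5                        -- permsCount[0] = 5 (n ≥ 1 on Pre_, else IndexError)
  let e : List (Array Int) := List.replicate 5 (Array.replicate n.toNat 0)
  let e := (List.range 5).foldl (fun e i => e.modify i (fun r => r.set! 0 1)) e   -- e[i][0] = 1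
  let st := (PySem.List.pyRange 1 n 1).foldl pvBodyA (permsCount, e)
  (st.1.getD (n-1).toNat 0) % pvMOD                            -- permsCount[n-1] (index ≥ 0 on Pre_)

-- ===== PORT B =====
-- a 5x5 integer matrix as eager data, like Source B's tuple-of-tuples
structure PvMat where
  (m00 m01 m02 m03 m04 : Int)
  (m10 m11 m12 m13 m14 : Int)
  (m20 m21 m22 m23 m24 : Int)
  (m30 m31 m32 m33 m34 : Int)
  (m40 m41 m42 m43 m44 : Int)
deriving Repr, DecidableEq

def pvGet (a : PvMat) : Fin 5 → Fin 5 → Int := fun i j =>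
  ![![a.m00, a.m01, a.m02, a.m03, a.m04],
    ![a.m10, a.m11, a.m12, a.m13, a.m14],
    ![a.m20, a.m21, a.m22, a.m23, a.m24],
    ![a.m30, a.m31, a.m32, a.m33, a.m34],
    ![a.m40, a.m41, a.m42, a.m43, a.m44]] i j

-- _T
def pvT : PvMat :=
  ⟨0,1,1,0,1, 1,0,1,0,0, 0,1,0,1,0, 0,0,1,0,0, 0,0,1,1,0⟩

-- entry (i,j) of _mul: sum over k in range(5) of a[i][k]*b[k][j], taken % MODULO_NUMBER
def pvEntry (a b : PvMat) (i j : Fin 5) : Int :=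
  (∑ k : Fin 5, pvGet a i k * pvGet b k j) % pvMOD

-- _mul: all 25 entries built eagerly, like Source B's tuple-of-tuples
def pvMul (a b : PvMat) : PvMat :=
  ⟨pvEntry a b 0 0, pvEntry a b 0 1, pvEntry a b 0 2, pvEntry a b 0 3, pvEntry a b 0 4,
   pvEntry a b 1 0, pvEntry a b 1 1, pvEntry a b 1 2, pvEntry a b 1 3, pvEntry a b 1 4,
   pvEntry a b 2 0, pvEntry a b 2 1, pvEntry a b 2 2, pvEntry a b 2 3, pvEntry a b 2 4,
   pvEntry a b 3 0, pvEntry a b 3 1, pvEntry a b 3 2, pvEntry a b 3 3, pvEntry a b 3 4,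
   pvEntry a b 4 0, pvEntry a b 4 1, pvEntry a b 4 2, pvEntry a b 4 3, pvEntry a b 4 4⟩

-- the identity built by Source B's `1 if i == j else 0` comprehension
def pvI : PvMat :=
  ⟨1,0,0,0,0, 0,1,0,0,0, 0,0,1,0,0, 0,0,0,1,0, 0,0,0,0,1⟩

-- the while-loop of Source B; for e > 0, `e & 1` is `e % 2 = 1` and `e >>= 1` is `e / 2`
def pvPowLoop (result base : PvMat) (e : Int) : PvMat :=
  if 0 < e then
    pvPowLoop (if e % 2 = 1 then pvMul result base else result) (pvMul base base) (e / 2)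
  else result
termination_by e.toNat
decreasing_by omega

def countPerms_alt (n : Int) : Int :=
  let result := pvPowLoop pvI pvT (n - 1)
  (∑ i : Fin 5, ∑ j : Fin 5, pvGet result i j) % pvMOD

-- ===== PRECONDITION & SPEC =====
-- Pre_ excludes exactly n ≤ 0, where A raises IndexError (permsCount[0] on an empty list).
def Pre_countPerms (n : Int) : Prop := 1 ≤ n
instance (n : Int) : Decidable (Pre_countPerms n) := by unfold Pre_countPerms; infer_instance
def pvWitness_countPerms : Int := 3

def Spec_countPerms (n : Int) (out : Int) : Prop := out = countPerms_alt n
instance (n : Int) (out : Int) : Decidable (Spec_countPerms n out) := by unfold Spec_countPerms; infer_instance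

-- ===== CLAIM (what is proved, stated in full; the proofs are below) =====
def Claim_equal_countPerms : Prop := ∀ (n : Int), Dom_countPerms n → Pre_countPerms n → Spec_countPerms n (countPerms n)

-- ===== LEMMAS AND PROOFS =====

-- modulus as a natural number, for ZMod
def pvN : Nat := 3486784408

theorem pvMOD_eq : pvMOD = (pvN : Int) := by decide

-- the exact column recurrence of A (already mod-reduced)
def pvStep (v : Fin 5 → Int) : Fin 5 → Int :=
  ![(v 1 + v 2 + v 4) % pvMOD, (v 0 + v 2) % pvMOD, (v 1 + v 3) % pvMOD,
    v 2 % pvMOD, (v 2 + v 3) % pvMOD]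

def pvF : Nat → Fin 5 → Int
  | 0 => fun _ => 1
  | k+1 => pvStep (pvF k)

def pvSum (k : Nat) : Int := pvF k 0 + pvF k 1 + pvF k 2 + pvF k 3 + pvF k 4

-- cast a 5x5 integer matrix into ZMod pvN
def pvCast (m : PvMat) : Matrix (Fin 5) (Fin 5) (ZMod pvN) :=
  Matrix.of fun i j => ((pvGet m i j : Int) : ZMod pvN)

theorem pvGet_mul (a b : PvMat) (i j : Fin 5) :
    pvGet (pvMul a b) i j = pvEntry a b i j := by
  fin_cases i <;> fin_cases j <;> rfl

theorem pvCast_mul (a b : PvMat) :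
    pvCast (pvMul a b) = pvCast a * pvCast b := by
  funext i j
  simp only [pvCast, Matrix.of_apply, pvGet_mul, pvEntry, Matrix.mul_apply, pvMOD_eq,
    ZMod.intCast_mod]
  push_cast
  rfl

theorem pvPowLoop_cast (e : Int) (r b : PvMat) :
    pvCast (pvPowLoop r b e) = pvCast r * (pvCast b) ^ e.toNat := by
  induction r, b, e using pvPowLoop.induct with
  | case2 r b e h =>
    rw [pvPowLoop]
    simp only [if_neg h]
    have h0 : e.toNat = 0 := by omega
    rw [h0, pow_zero, mul_one]
  | case1 r b e h ih =>
    simp only [dite_eq_ite] at ih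
    rw [pvPowLoop, if_pos h, ih, pvCast_mul]
    have hb : pvCast b * pvCast b = pvCast b ^ 2 := (sq _).symm
    by_cases hp : e % 2 = 1
    · have h2 : e.toNat = 2 * (e / 2).toNat + 1 := by omega
      rw [if_pos hp, pvCast_mul, hb, ← pow_mul, h2, pow_succ', ← mul_assoc]
    · have h2 : e.toNat = 2 * (e / 2).toNat := by omega
      rw [if_neg hp, hb, ← pow_mul, h2]

def pvS (k : Nat) : Fin 5 → ZMod pvN := fun i => ((pvF k i : Int) : ZMod pvN)

theorem pvPow_mulVec (k : Nat) :
    ((pvCast pvT) ^ k).mulVec (fun _ => (1 : ZMod pvN)) = pvS k := by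
  induction k with
  | zero =>
    funext i
    simp [pvS, pvF, Matrix.one_mulVec]
  | succ k ih =>
    rw [pow_succ', ← Matrix.mulVec_mulVec, ih]
    funext i
    fin_cases i <;>
      simp [Matrix.mulVec, dotProduct, Fin.sum_univ_five, pvCast, pvGet, pvT, pvS, pvF, pvStep,
        pvMOD_eq, ZMod.intCast_mod]

-- A-side loop invariant
theorem pvLoopA (k : Nat) : ∀ (n a : Int), 1 ≤ a → n = a + k →
    ∀ (pc r0 r1 r2 r3 r4 : Array Int),
    pc.size = n.toNat → r0.size = n.toNat → r1.size = n.toNat →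
    r2.size = n.toNat → r3.size = n.toNat → r4.size = n.toNat →
    pc.getD (a.toNat - 1) 0 = pvSum (a.toNat - 1) →
    r0.getD (a.toNat - 1) 0 = pvF (a.toNat - 1) 0 →
    r1.getD (a.toNat - 1) 0 = pvF (a.toNat - 1) 1 →
    r2.getD (a.toNat - 1) 0 = pvF (a.toNat - 1) 2 →
    r3.getD (a.toNat - 1) 0 = pvF (a.toNat - 1) 3 →
    r4.getD (a.toNat - 1) 0 = pvF (a.toNat - 1) 4 →
    ((PySem.List.pyRange a n 1).foldl pvBodyA (pc, [r0, r1, r2, r3, r4])).1.getD (n.toNat - 1) 0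
      = pvSum (n.toNat - 1) := by
  induction k with
  | zero =>
    intro n a ha hn pc r0 r1 r2 r3 r4 hl0 hl1 hl2 hl3 hl4 hl5 hpc h0 h1 h2 h3 h4
    have hna : n = a := by omega
    subst hna
    simp only [PySem.List.pyRange_one, sub_self, Int.toNat_zero, List.range_zero,
      List.map_nil, List.foldl_nil]
    exact hpc
  | succ k ih =>
    intro n a ha hn pc r0 r1 r2 r3 r4 hl0 hl1 hl2 hl3 hl4 hl5 hpc h0 h1 h2 h3 h4
    have hab : a < n := by omega
    rw [PySem.List.pyRange_one_cons hab, List.foldl_cons]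
    set jn := a.toNat with hjn
    have hj1 : 1 ≤ jn := by omega
    have hjlt : jn < n.toNat := by omega
    have hne : jn ≠ jn - 1 := by omega
    have hset1 : ∀ (r : Array Int) (x : Int), (r.set! jn x).getD (jn-1) 0 = r.getD (jn-1) 0 := by
      intro r x
      simp [Array.getD_eq_getD_getElem?, Array.set!, hne]
    have hget : ∀ (r : Array Int) (x : Int), r.size = n.toNat → (r.set! jn x).getD jn 0 = x := by
      intro r x hl
      simp [Array.getD_eq_getD_getElem?, Array.set!, hl ▸ hjlt]
    have hstep : ∀ i : Fin 5, pvStep (pvF (jn - 1)) i = pvF jn i := by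
      intro i
      have hjj : jn = (jn - 1) + 1 := by omega
      rw [hjj]; rfl
    have hr5 : List.range 5 = [0, 1, 2, 3, 4] := rfl
    have hms : ∀ (x : Int) (f : Int → Int), (pc.set! jn x).modify jn f = pc.set! jn (f x) := by
      intro x f
      apply Array.ext_getElem?
      intro i
      simp only [Array.set!, Array.getElem?_modify, Array.getElem?_setIfInBounds]
      by_cases hij : jn = i <;> simp [hij]
    have h0' : r0[jn-1]?.getD 0 = pvF (jn-1) 0 := by
      simpa [Array.getD_eq_getD_getElem?] using h0
    have h1' : r1[jn-1]?.getD 0 = pvF (jn-1) 1 := by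
      simpa [Array.getD_eq_getD_getElem?] using h1
    have h2' : r2[jn-1]?.getD 0 = pvF (jn-1) 2 := by
      simpa [Array.getD_eq_getD_getElem?] using h2
    have h3' : r3[jn-1]?.getD 0 = pvF (jn-1) 3 := by
      simpa [Array.getD_eq_getD_getElem?] using h3
    have h4' : r4[jn-1]?.getD 0 = pvF (jn-1) 4 := by
      simpa [Array.getD_eq_getD_getElem?] using h4
    have body : pvBodyA (pc, [r0, r1, r2, r3, r4]) a =
        (pc.set! jn (pvSum jn),
         [r0.set! jn (pvF jn 0), r1.set! jn (pvF jn 1), r2.set! jn (pvF jn 2),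
          r3.set! jn (pvF jn 3), r4.set! jn (pvF jn 4)]) := by
      have e0 : (pvF (jn-1) 1 + pvF (jn-1) 2 + pvF (jn-1) 4) % pvMOD = pvF jn 0 := by
        rw [← hstep 0]; simp [pvStep]
      have e1 : (pvF (jn-1) 0 + pvF (jn-1) 2) % pvMOD = pvF jn 1 := by
        rw [← hstep 1]; simp [pvStep]
      have e2 : (pvF (jn-1) 1 + pvF (jn-1) 3) % pvMOD = pvF jn 2 := by
        rw [← hstep 2]; simp [pvStep]
      have e3 : pvF (jn-1) 2 % pvMOD = pvF jn 3 := by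
        rw [← hstep 3]; simp [pvStep]
      have e4 : (pvF (jn-1) 2 + pvF (jn-1) 3) % pvMOD = pvF jn 4 := by
        rw [← hstep 4]; simp [pvStep]
      simp only [pvBodyA, ← hjn, List.getD_cons_zero, List.getD_cons_succ, List.modify,
        hr5, List.foldl_cons, List.foldl_nil, hms]
      simp only [Array.set!, Array.getD_eq_getD_getElem?, Array.getElem?_setIfInBounds,
        Array.getElem?_modify, hne, if_false, ite_true, eq_self_iff_true, if_true,
        hl1, hl2, hl3, hl4, hl5, hjlt, h0', h1', h2', h3', h4']
      simp [hne, hjlt, hl1, hl2, hl3, hl4, hl5, h0', h1', h2', h3', h4', e0, e1, e2, e3, e4, pvSum]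
    rw [body]
    have hA : (a+1).toNat - 1 = jn := by omega
    apply ih n (a+1) (by omega) (by omega) _ _ _ _ _ _
      (by simpa [Array.set!] using hl0) (by simpa [Array.set!] using hl1)
      (by simpa [Array.set!] using hl2) (by simpa [Array.set!] using hl3)
      (by simpa [Array.set!] using hl4) (by simpa [Array.set!] using hl5)
    · rw [hA]; exact hget pc _ hl0
    · rw [hA]; exact hget r0 _ hl1
    · rw [hA]; exact hget r1 _ hl2
    · rw [hA]; exact hget r2 _ hl3
    · rw [hA]; exact hget r3 _ hl4
    · rw [hA]; exact hget r4 _ hl5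

theorem countPerms_eq_sum (n : Int) (hn : 1 ≤ n) :
    countPerms n = pvSum (n.toNat - 1) % pvMOD := by
  have hm : 1 ≤ n.toNat := by omega
  have hinit : (List.range 5).foldl (fun e i => e.modify i (fun r => r.set! 0 1))
      (List.replicate 5 (Array.replicate n.toNat 0)) =
      [(Array.replicate n.toNat (0:Int)).set! 0 1, (Array.replicate n.toNat 0).set! 0 1,
       (Array.replicate n.toNat 0).set! 0 1, (Array.replicate n.toNat 0).set! 0 1,
       (Array.replicate n.toNat 0).set! 0 1] := by
    rfl
  have hone : ((Array.replicate n.toNat (0:Int)).set! 0 1).getD 0 0 = 1 := by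
    simp [Array.getD_eq_getD_getElem?, Array.set!, show (0:Int) < n by omega]
  have hfive : ((Array.replicate n.toNat (0:Int)).set! 0 5).getD 0 0 = 5 := by
    simp [Array.getD_eq_getD_getElem?, Array.set!, show (0:Int) < n by omega]
  have key := pvLoopA (n - 1).toNat n 1 (by omega) (by omega)
    ((Array.replicate n.toNat 0).set! 0 5)
    ((Array.replicate n.toNat 0).set! 0 1) ((Array.replicate n.toNat 0).set! 0 1)
    ((Array.replicate n.toNat 0).set! 0 1) ((Array.replicate n.toNat 0).set! 0 1)
    ((Array.replicate n.toNat 0).set! 0 1)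
    (by simp [Array.set!]) (by simp [Array.set!]) (by simp [Array.set!])
    (by simp [Array.set!]) (by simp [Array.set!]) (by simp [Array.set!])
    (by simpa [pvSum, pvF] using hfive)
    (by simpa [pvF] using hone) (by simpa [pvF] using hone) (by simpa [pvF] using hone)
    (by simpa [pvF] using hone) (by simpa [pvF] using hone)
  have hidx : (n - 1).toNat = n.toNat - 1 := by omega
  simp only [countPerms, hinit, hidx]
  rw [key]

theorem countPerms_alt_eq (n : Int) (hn : 1 ≤ n) :
    countPerms_alt n = countPerms n := by
  rw [countPerms_eq_sum n hn]
  have hk : (n - 1).toNat = n.toNat - 1 := by omega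
  set k := n.toNat - 1 with hkdef
  -- cast of B's pre-mod sum equals cast of A's pre-mod sum
  have hI : pvCast pvI = 1 := by
    funext i j
    fin_cases i <;> fin_cases j <;> simp [pvCast, pvGet, pvI]
  have hres : pvCast (pvPowLoop pvI pvT (n-1)) = (pvCast pvT) ^ k := by
    rw [pvPowLoop_cast, hI, one_mul, hk]
  have hcast : ((∑ i : Fin 5, ∑ j : Fin 5, pvGet (pvPowLoop pvI pvT (n-1)) i j : Int) : ZMod pvN)
      = ((pvSum k : Int) : ZMod pvN) := by
    push_cast
    have : ∀ i j, ((pvGet (pvPowLoop pvI pvT (n-1)) i j : Int) : ZMod pvN)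
        = ((pvCast pvT) ^ k) i j := by
      intro i j
      rw [← hres]; rfl
    simp only [this]
    have hv := pvPow_mulVec k
    have hsum : ∀ i, ∑ j : Fin 5, ((pvCast pvT) ^ k) i j = pvS k i := by
      intro i
      rw [← hv]
      simp [Matrix.mulVec, dotProduct]
    rw [Finset.sum_congr rfl (fun i _ => hsum i)]
    simp [pvS, pvSum, Fin.sum_univ_five]
  -- transfer the ZMod equality back to % pvMOD
  have := (ZMod.intCast_eq_intCast_iff _ _ _).mp hcast
  have hmod : (∑ i : Fin 5, ∑ j : Fin 5, pvGet (pvPowLoop pvI pvT (n-1)) i j) % (pvN : Int)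
      = (pvSum k) % (pvN : Int) := this
  simp only [countPerms_alt, pvMOD_eq]
  exact hmod

-- ===== VERDICT (by name: the statement is the Claim_ definition above) =====
theorem countPerms_spec : Claim_equal_countPerms := by
  intro n _ hpre
  exact (countPerms_alt_eq n hpre).symm
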